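-- pv_equiv track=rewrite | github.com/Seris0/QuickImportXXMI | quickimport/modules/datahandling.py | checkEnclosedFacesVertex
-- ===== SOURCE A (Python) =====
-- def recursive_connections(Over2_connected_points):
--     for entry, connectedpointentry in Over2_connected_points.items():
--         if len(connectedpointentry & Over2_connected_points.keys()) < 2:
--             Over2_connected_points.pop(entry)
--             if len(Over2_connected_points) < 3:
--                 return False
--             return recursive_connections(Over2_connected_points)
--     return True
--
-- def checkEnclosedFacesVertex(ConnectedFaces, vg_set, Precalculated_Outline_data):
--
--     Main_connected_points = {}
--         # connected points non-same vertex
--     for face in ConnectedFaces: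
--         non_vg_points = [p for p in face if p not in vg_set]
--         if len(non_vg_points) > 1:
--             for point in non_vg_points:
--                 Main_connected_points.setdefault(point, []).extend([x for x in non_vg_points if x != point])
--         # connected points same vertex
--     New_Main_connect = {}
--     for entry, value in Main_connected_points.items():
--         for val in value:
--             ivspv = Precalculated_Outline_data.get('Same_Vertex').get(val)-{val}
--             intersect_sidevertex = ivspv & Main_connected_points.keys()
--             if intersect_sidevertex:
--                 New_Main_connect.setdefault(entry, []).extend(list(intersect_sidevertex))
--         # connected points same vertex reverse connection
--     for key, value in New_Main_connect.items():
--         Main_connected_points.get(key).extend(value)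
--         for val in value:
--             Main_connected_points.get(val).append(key)
--         # exclude for only 2 way paths
--     Over2_connected_points = {k: set(v) for k, v in Main_connected_points.items() if len(v) > 1}
--
--     return recursive_connections(Over2_connected_points)
-- ===== SOURCE B (Python) =====
-- def checkEnclosedFacesVertex(ConnectedFaces, vg_set, Precalculated_Outline_data):
--     # Build the connection multigraph (same data as A builds), then decide the answer
--     # by computing the 2-core with simultaneous low-degree filtering to a fixpoint,
--     # instead of A's recursive scan-pop-rescan peeling with early-exit size checks.
--     vg = set(vg_set)
--     conn = {}
--     for face in ConnectedFaces:
--         nvg = [p for p in face if p not in vg]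
--         if len(nvg) > 1:
--             for p in nvg:
--                 conn.setdefault(p, []).extend(x for x in nvg if x != p)
--     if any(conn.values()):
--         sv = Precalculated_Outline_data['Same_Vertex']
--         extra = {e: [w for v in vals for w in (sv[v] - {v}) & conn.keys()]
--                  for e, vals in conn.items()}
--         for e, ws in extra.items():
--             conn[e].extend(ws)
--             for w in ws:
--                 conn[w].append(e)
--     alive = {k for k, v in conn.items() if len(v) > 1}
--     nbrs = {k: set(conn[k]) for k in alive}
--     total = len(alive)
--     while True:
--         keep = {k for k in alive if len(nbrs[k] & alive) >= 2}
--         if len(keep) == len(alive):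
--             break
--         alive = keep
--     return len(alive) >= 3 or len(alive) == total
-- ===== Notes on version B (the rewrite author's own statement) =====
-- stated objective: alternative
-- what changed: B replaces A's recursive peeling (rescan the whole dict after every single removal, early-exiting on a size check) by a 2-core computation that repeatedly filters out all vertices of degree < 2 at once until a fixpoint, and then decides with the closed condition 'core size >= 3 or nothing was removed'; the graph build uses comprehensions and one guarded lookup of the Same_Vertex table.
import Mathlib
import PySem

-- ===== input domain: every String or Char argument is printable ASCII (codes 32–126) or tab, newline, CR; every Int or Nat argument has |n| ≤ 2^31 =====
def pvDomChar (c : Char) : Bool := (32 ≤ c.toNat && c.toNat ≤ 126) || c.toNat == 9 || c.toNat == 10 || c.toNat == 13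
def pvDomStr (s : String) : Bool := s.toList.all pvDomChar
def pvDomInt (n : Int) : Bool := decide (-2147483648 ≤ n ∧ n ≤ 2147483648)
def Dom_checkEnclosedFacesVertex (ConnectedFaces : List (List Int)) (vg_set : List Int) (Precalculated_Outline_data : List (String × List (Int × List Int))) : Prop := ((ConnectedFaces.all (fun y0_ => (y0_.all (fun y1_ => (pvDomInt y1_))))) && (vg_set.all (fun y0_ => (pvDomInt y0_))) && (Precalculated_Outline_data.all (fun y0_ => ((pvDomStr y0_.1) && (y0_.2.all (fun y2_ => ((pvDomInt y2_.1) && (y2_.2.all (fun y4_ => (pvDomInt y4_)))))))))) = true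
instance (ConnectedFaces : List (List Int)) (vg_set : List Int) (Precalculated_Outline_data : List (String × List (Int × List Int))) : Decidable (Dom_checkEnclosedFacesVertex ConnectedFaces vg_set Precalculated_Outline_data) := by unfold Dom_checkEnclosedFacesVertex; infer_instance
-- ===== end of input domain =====

-- B replaces A's recursive scan-pop-rescan peeling by a simultaneous low-degree-filter-to-fixpoint
-- 2-core computation with the closed final condition "core size ≥ 3 or nothing was removed" (objective: alternative).

-- ===== PORT A =====
def pvMainA (ConnectedFaces : List (List Int)) (vg_set : List Int) : PySem.Dict Int (List Int) :=
  ConnectedFaces.foldl (fun m face =>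
    let nvg := face.filter (fun p => !(vg_set.contains p))
    if 1 < nvg.length then
      nvg.foldl (fun m point => m.modify point [] (· ++ nvg.filter (fun x => !(x == point)))) m
    else m) PySem.Dict.empty

def pvNewA (main : PySem.Dict Int (List Int)) (sv : PySem.Dict Int (List Int)) : PySem.Dict Int (List Int) :=
  main.items.foldl (fun nm ev =>
    ev.2.foldl (fun nm val =>
      let ivspv := PySem.Set.diff (PySem.Set.ofList (sv.getD val [])) [val]
      let intersect := PySem.Set.inter ivspv main.keys
      if intersect.isEmpty then nm else nm.modify ev.1 [] (· ++ intersect)) nm)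
    PySem.Dict.empty

def pvRevA (main : PySem.Dict Int (List Int)) (nw : PySem.Dict Int (List Int)) : PySem.Dict Int (List Int) :=
  nw.items.foldl (fun m kv =>
    kv.2.foldl (fun m val => m.modify val [] (· ++ [kv.1])) (m.modify kv.1 [] (· ++ kv.2))) main

def pvRecConn (g : List (Int × List Int)) : Bool :=
  match h : g.findIdx? (fun e => decide ((PySem.Set.inter e.2 (g.map (fun p => p.1))).length < 2)) with
  | none => true
  | some i =>
      let g' := g.eraseIdx i
      if g'.length < 3 then false else pvRecConn g'
termination_by g.length
decreasing_by
  have hi : i < g.length := (List.findIdx?_eq_some_iff_findIdx_eq.mp h).1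
  simp [List.length_eraseIdx, hi]
  omega

def checkEnclosedFacesVertex (ConnectedFaces : List (List Int)) (vg_set : List Int) (Precalculated_Outline_data : List (String × List (Int × List Int))) : Bool :=
  let main := pvMainA ConnectedFaces vg_set
  let sv : PySem.Dict Int (List Int) := PySem.Dict.mk ((PySem.Dict.mk Precalculated_Outline_data).getD "Same_Vertex" [])
  let main2 := pvRevA main (pvNewA main sv)
  pvRecConn ((main2.items.filter (fun kv => 1 < kv.2.length)).map (fun kv => (kv.1, PySem.Set.ofList kv.2)))

-- ===== PORT B =====
def pvConnB (ConnectedFaces : List (List Int)) (vg_set : List Int) : PySem.Dict Int (List Int) :=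
  ConnectedFaces.foldl (fun c face =>
    let nvg := face.filter (fun p => !(vg_set.contains p))
    if 1 < nvg.length then
      nvg.foldl (fun c p => c.modify p [] (· ++ nvg.filter (fun x => !(x == p)))) c
    else c) PySem.Dict.empty

def pvExtraB (conn : PySem.Dict Int (List Int)) (sv : PySem.Dict Int (List Int)) : List (Int × List Int) :=
  conn.items.map (fun ev =>
    (ev.1, ev.2.flatMap (fun v =>
      PySem.Set.inter (PySem.Set.diff (PySem.Set.ofList (sv.getD v [])) [v]) conn.keys)))

def pvApplyB (conn : PySem.Dict Int (List Int)) (extra : List (Int × List Int)) : PySem.Dict Int (List Int) :=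
  extra.foldl (fun c ew =>
    ew.2.foldl (fun c w => c.modify w [] (· ++ [ew.1])) (c.modify ew.1 [] (· ++ ew.2))) conn

def pvPeel (nbr : Int → List Int) (alive : List Int) : List Int :=
  if (alive.filter (fun k => decide (2 ≤ (PySem.Set.inter (nbr k) alive).length))).length = alive.length then alive
  else pvPeel nbr (alive.filter (fun k => decide (2 ≤ (PySem.Set.inter (nbr k) alive).length)))
termination_by alive.length
decreasing_by
  rename_i hne
  have e : ∀ (f : {x // x ∈ alive} → Bool) (g : Int → Bool), (∀ x h, f ⟨x, h⟩ = g x) →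
      (alive.attach.filter f).unattach.length = (alive.filter g).length := by
    intro f g hfg
    rw [@List.unattach_filter _ _ _ f g hfg, List.unattach_attach]
  rw [e _ (fun k => decide (2 ≤ (PySem.Set.inter (nbr k) alive).length)) (fun x h => rfl)] at hne ⊢
  have hle : (alive.filter (fun k => decide (2 ≤ (PySem.Set.inter (nbr k) alive).length))).length ≤ alive.length :=
    List.length_filter_le _ _
  omega

def checkEnclosedFacesVertex_alt (ConnectedFaces : List (List Int)) (vg_set : List Int) (Precalculated_Outline_data : List (String × List (Int × List Int))) : Bool :=
  let conn := pvConnB ConnectedFaces vg_set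
  let conn2 := if conn.values.any (fun v => !v.isEmpty) then
      pvApplyB conn (pvExtraB conn (PySem.Dict.mk ((PySem.Dict.mk Precalculated_Outline_data).getD "Same_Vertex" [])))
    else conn
  let alive := (conn2.items.filter (fun kv => 1 < kv.2.length)).map (fun kv => kv.1)
  let core := pvPeel (fun k => PySem.Set.ofList (conn2.getD k [])) alive
  decide (3 ≤ core.length) || decide (core.length = alive.length)

-- ===== PRECONDITION & SPEC =====
-- A face "needs" the Same_Vertex table when it has at least two distinct non-vg points (only then
-- does A reach the 'Same_Vertex' lookups). Pre_ excludes exactly the inputs where one of those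
-- lookups is missing, on which A raises (AttributeError on a missing 'Same_Vertex' key, TypeError
-- on a point absent from the table) — A returns normally on every other input.
def pvNeedsSV (vg_set : List Int) (face : List Int) : Bool :=
  match face.filter (fun p => !(vg_set.contains p)) with
  | [] => false
  | x :: rest => rest.any (fun y => !(y == x))

def Pre_checkEnclosedFacesVertex (ConnectedFaces : List (List Int)) (vg_set : List Int) (Precalculated_Outline_data : List (String × List (Int × List Int))) : Prop :=
  (!(ConnectedFaces.any (pvNeedsSV vg_set)) ||
    (match (PySem.Dict.mk Precalculated_Outline_data).get? "Same_Vertex" with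
     | none => false
     | some sv => ConnectedFaces.all (fun face =>
         !(pvNeedsSV vg_set face) ||
         (face.filter (fun q => !(vg_set.contains q))).all (fun p => ((PySem.Dict.mk sv).get? p).isSome)))) = true
instance (ConnectedFaces : List (List Int)) (vg_set : List Int) (Precalculated_Outline_data : List (String × List (Int × List Int))) : Decidable (Pre_checkEnclosedFacesVertex ConnectedFaces vg_set Precalculated_Outline_data) := by unfold Pre_checkEnclosedFacesVertex; infer_instance

def pvWitness_checkEnclosedFacesVertex : List (List Int) × List Int × (List (String × List (Int × List Int))) :=
  ([[1, 2, 3], [2, 3, 1]], [], [("Same_Vertex", [(1, [1]), (2, [2]), (3, [3])])])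

def Spec_checkEnclosedFacesVertex (ConnectedFaces : List (List Int)) (vg_set : List Int) (Precalculated_Outline_data : List (String × List (Int × List Int))) (out : Bool) : Prop := out = checkEnclosedFacesVertex_alt ConnectedFaces vg_set Precalculated_Outline_data
instance (ConnectedFaces : List (List Int)) (vg_set : List Int) (Precalculated_Outline_data : List (String × List (Int × List Int))) (out : Bool) : Decidable (Spec_checkEnclosedFacesVertex ConnectedFaces vg_set Precalculated_Outline_data out) := by unfold Spec_checkEnclosedFacesVertex; infer_instance

-- ===== CLAIM (what is proved, stated in full; the proofs are below) =====
def Claim_equal_checkEnclosedFacesVertex : Prop := ∀ (ConnectedFaces : List (List Int)) (vg_set : List Int) (Precalculated_Outline_data : List (String × List (Int × List Int))), Dom_checkEnclosedFacesVertex ConnectedFaces vg_set Precalculated_Outline_data → Pre_checkEnclosedFacesVertex ConnectedFaces vg_set Precalculated_Outline_data → Spec_checkEnclosedFacesVertex ConnectedFaces vg_set Precalculated_Outline_data (checkEnclosedFacesVertex ConnectedFaces vg_set Precalculated_Outline_data)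

-- ===== LEMMAS AND PROOFS =====

-- generic fold invariant
theorem pvFoldlPreserve {α β : Type} (P : α → Prop) (f : α → β → α) (l : List β) (c : α)
    (h0 : P c) (hstep : ∀ c x, P c → P (f c x)) : P (l.foldl f c) := by
  induction l generalizing c with
  | nil => exact h0
  | cons x l ih => exact ih _ (hstep _ _ h0)

-- Dict facts specific to the list-append modify loops of the two programs
theorem pvNodupKeysModify {ν : Type} (d : PySem.Dict Int ν) (k : Int) (d0 : ν) (f : ν → ν)
    (h : d.keys.Nodup) : (d.modify k d0 f).keys.Nodup := by
  simpa [PySem.Dict.modify] using PySem.Dict.nodup_keys_insert d k (f (d.getD k d0)) h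

theorem pvSubsetKeysModify {ν : Type} (d : PySem.Dict Int ν) (k : Int) (d0 : ν) (f : ν → ν) :
    d.keys ⊆ (d.modify k d0 f).keys := by
  intro x hx
  by_cases hc : d.contains k = true
  · rw [PySem.Dict.modify, PySem.Dict.keys_insert_of_contains _ _ hc]; exact hx
  · rw [PySem.Dict.modify, PySem.Dict.keys_insert_of_not_contains _ _ (by simpa using hc)]
    exact List.mem_append_left _ hx

theorem pvModifyModifyAppend (d : PySem.Dict Int (List Int)) (k : Int) (a b : List Int) :
    (d.modify k [] (· ++ a)).modify k [] (· ++ b) = d.modify k [] (· ++ (a ++ b)) := by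
  simp [PySem.Dict.modify, PySem.Dict.getD_insert_self, PySem.Dict.insert_insert_self]

theorem pvModifyAppendNil (d : PySem.Dict Int (List Int)) (k : Int)
    (hmem : k ∈ d.keys) (hnd : d.keys.Nodup) : d.modify k [] (· ++ []) = d := by
  have hc : d.contains k = true := (PySem.Dict.contains_iff_mem_keys d k).mpr hmem
  apply PySem.Dict.ext
  rw [PySem.Dict.modify, PySem.Dict.items_insert_of_contains _ _ hc]
  have h : ∀ p ∈ d.items, (if (p.1 == k) = true then (k, d.getD k [] ++ []) else p) = id p := by
    intro p hp
    by_cases hpk : p.1 = k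
    · subst hpk
      have hg := PySem.Dict.getD_of_mem_items d (k := p.1) (v := p.2) (by simpa using hp) hnd []
      simp [hg]
    · simp [hpk]
  rw [List.map_congr_left h, List.map_id]

theorem pvModifyFresh (d : PySem.Dict Int (List Int)) (k : Int) (a : List Int)
    (h : k ∉ d.keys) : (d.modify k [] (· ++ a)).items = d.items ++ [(k, a)] := by
  have hc : d.contains k = false := by
    by_contra hcc
    exact h ((PySem.Dict.contains_iff_mem_keys d k).mp (by simpa using hcc))
  rw [PySem.Dict.modify, PySem.Dict.getD_of_not_contains _ _ hc,
    PySem.Dict.items_insert_of_not_contains _ _ hc]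
  simp

theorem pvKeysModifyFresh (d : PySem.Dict Int (List Int)) (k : Int) (f : List Int → List Int)
    (h : k ∉ d.keys) : (d.modify k [] f).keys = d.keys ++ [k] := by
  have hc : d.contains k = false := by
    rcases Bool.eq_false_or_eq_true (d.contains k) with h' | h'
    · exact absurd ((PySem.Dict.contains_iff_mem_keys d k).mp h') h
    · exact h'
  rw [PySem.Dict.modify, PySem.Dict.keys_insert_of_not_contains _ _ hc]

theorem pvStepKeysNodup (c : PySem.Dict Int (List Int)) (ew : Int × List Int) (h : c.keys.Nodup) :
    (ew.2.foldl (fun c w => c.modify w [] (· ++ [ew.1])) (c.modify ew.1 [] (· ++ ew.2))).keys.Nodup :=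
  pvFoldlPreserve (P := fun d : PySem.Dict Int (List Int) => d.keys.Nodup)
    (f := fun c w => c.modify w [] (· ++ [ew.1])) (l := ew.2) (c := c.modify ew.1 [] (· ++ ew.2))
    (pvNodupKeysModify _ _ _ _ h) (fun c x hc => pvNodupKeysModify c x [] _ hc)

theorem pvStepKeysSubset (c : PySem.Dict Int (List Int)) (ew : Int × List Int) :
    c.keys ⊆ (ew.2.foldl (fun c w => c.modify w [] (· ++ [ew.1])) (c.modify ew.1 [] (· ++ ew.2))).keys :=
  pvFoldlPreserve (P := fun d : PySem.Dict Int (List Int) => c.keys ⊆ d.keys)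
    (f := fun c w => c.modify w [] (· ++ [ew.1])) (l := ew.2) (c := c.modify ew.1 [] (· ++ ew.2))
    (pvSubsetKeysModify _ _ _ _) (fun d x hd => subset_trans hd (pvSubsetKeysModify d x [] _))

theorem pvExtraMemKeys (conn sv : PySem.Dict Int (List Int)) :
    ∀ ew ∈ pvExtraB conn sv, ew.1 ∈ conn.keys := by
  intro ew hew
  simp only [pvExtraB, List.mem_map] at hew
  obtain ⟨ev, hev, rfl⟩ := hew
  simp only [PySem.Dict.keys]
  exact List.mem_map_of_mem hev

-- the inner loop of A's Same_Vertex phase, summed up over the value list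
theorem pvNewInner (e : Int) (h : Int → List Int) (vals : List Int) (nm : PySem.Dict Int (List Int)) :
    vals.foldl (fun nm v => if (h v).isEmpty then nm else nm.modify e [] (· ++ h v)) nm
      = if (vals.flatMap h).isEmpty then nm else nm.modify e [] (· ++ vals.flatMap h) := by
  induction vals generalizing nm with
  | nil => simp
  | cons v vs ih =>
    simp only [List.foldl_cons, List.flatMap_cons]
    by_cases hv : (h v).isEmpty
    · have hv' : h v = [] := by simpa using hv
      rw [if_pos hv, ih, hv', List.nil_append]
    · have hv' : h v ≠ [] := by simpa using hv
      rw [if_neg hv, ih]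
      by_cases hr : (vs.flatMap h).isEmpty
      · have hr' : vs.flatMap h = [] := by simpa using hr
        rw [if_pos hr, hr', List.append_nil, if_neg (by simpa using hv')]
      · rw [if_neg hr, pvModifyModifyAppend,
          if_neg (by simp [hv'])]

-- A's New_Main_connect is exactly B's extra list without its empty entries
theorem pvNewAEq (main sv : PySem.Dict Int (List Int)) (hnd : main.keys.Nodup) :
    (pvNewA main sv).items = (pvExtraB main sv).filter (fun ew => !ew.2.isEmpty) := by
  have H : ∀ (l : List (Int × List Int)) (nm : PySem.Dict Int (List Int)),
      (l.map (fun p => p.1)).Nodup → (∀ ev ∈ l, ev.1 ∉ nm.keys) →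
      (l.foldl (fun nm ev =>
        ev.2.foldl (fun nm val =>
          if (PySem.Set.inter (PySem.Set.diff (PySem.Set.ofList (sv.getD val [])) [val]) main.keys).isEmpty
          then nm
          else nm.modify ev.1 [] (· ++ PySem.Set.inter (PySem.Set.diff (PySem.Set.ofList (sv.getD val [])) [val]) main.keys)) nm) nm).items
      = nm.items ++ (l.map (fun ev => (ev.1, ev.2.flatMap (fun v =>
          PySem.Set.inter (PySem.Set.diff (PySem.Set.ofList (sv.getD v [])) [v]) main.keys)))).filter (fun ew => !ew.2.isEmpty) := by
    intro l
    induction l with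
    | nil => intro nm _ _; simp
    | cons ev l ih =>
      intro nm hnd2 hfresh
      simp only [List.foldl_cons, List.map_cons, List.filter_cons]
      rw [pvNewInner]
      by_cases hg : (ev.2.flatMap (fun v =>
          PySem.Set.inter (PySem.Set.diff (PySem.Set.ofList (sv.getD v [])) [v]) main.keys)).isEmpty
      · rw [if_pos hg, ih nm (by simpa using hnd2.of_cons) (fun e he => hfresh e (List.mem_cons_of_mem _ he))]
        simp [hg]
      · rw [if_neg hg]
        have hf1 : ev.1 ∉ nm.keys := hfresh ev (List.mem_cons_self)
        have hkeys := pvKeysModifyFresh nm ev.1 (· ++ ev.2.flatMap (fun v => PySem.Set.inter (PySem.Set.diff (PySem.Set.ofList (sv.getD v [])) [v]) main.keys)) hf1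
        rw [ih _ (by simpa using hnd2.of_cons) ?fresh]
        case fresh =>
          intro e he
          rw [hkeys]
          intro hmem
          rcases List.mem_append.mp hmem with hmem | hmem
          · exact hfresh e (List.mem_cons_of_mem _ he) hmem
          · have : e.1 = ev.1 := List.mem_singleton.mp hmem
            have : ev.1 ∈ l.map (fun p => p.1) := this ▸ List.mem_map_of_mem he
            simp only [List.map_cons, List.nodup_cons] at hnd2
            exact hnd2.1 this
        rw [pvModifyFresh nm ev.1 _ hf1]
        simp [hg]
  have h0 : ∀ ev ∈ main.items, ev.1 ∉ (PySem.Dict.empty (κ := Int) (ν := List Int)).keys := by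
    intro ev _ h
    simp [PySem.Dict.empty, PySem.Dict.keys] at h
  have := H main.items PySem.Dict.empty (by exact hnd) h0
  simpa [pvNewA, pvExtraB, PySem.Dict.empty, PySem.Dict.items] using this

-- the reverse-connection fold skips empty entries
theorem pvApplyFilter (extra : List (Int × List Int)) : ∀ (c : PySem.Dict Int (List Int)),
    c.keys.Nodup → (∀ ew ∈ extra, ew.1 ∈ c.keys) →
    pvApplyB c extra = pvApplyB c (extra.filter (fun ew => !ew.2.isEmpty)) := by
  induction extra with
  | nil => intro c _ _; rfl
  | cons ew l ih =>
    intro c hnd hmem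
    simp only [pvApplyB, List.foldl_cons, List.filter_cons]
    by_cases hw : ew.2.isEmpty
    · have hw' : ew.2 = [] := by simpa using hw
      rw [hw, Bool.not_true, if_neg (by simp)]
      rw [hw', List.foldl_nil, pvModifyAppendNil c ew.1 (hmem ew List.mem_cons_self) hnd]
      exact ih c hnd (fun e he => hmem e (List.mem_cons_of_mem _ he))
    · have hw2 : (!ew.2.isEmpty) = true := by simp_all
      rw [hw2, if_pos rfl]
      simp only [List.foldl_cons]
      exact ih _ (pvStepKeysNodup c ew hnd)
        (fun e he => pvStepKeysSubset c ew (hmem e (List.mem_cons_of_mem _ he)))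

theorem pvRevAEqApply (main sv : PySem.Dict Int (List Int)) (hnd : main.keys.Nodup) :
    pvRevA main (pvNewA main sv) = pvApplyB main (pvExtraB main sv) := by
  have h1 : pvRevA main (pvNewA main sv) = pvApplyB main ((pvExtraB main sv).filter (fun ew => !ew.2.isEmpty)) := by
    rw [pvRevA, pvNewAEq main sv hnd]; rfl
  rw [h1, ← pvApplyFilter _ main hnd (pvExtraMemKeys main sv)]

theorem pvApplyGuardFalse (main sv : PySem.Dict Int (List Int)) (hnd : main.keys.Nodup)
    (h : main.values.any (fun v => !v.isEmpty) = false) :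
    pvApplyB main (pvExtraB main sv) = main := by
  rw [pvApplyFilter _ main hnd (pvExtraMemKeys main sv)]
  have : (pvExtraB main sv).filter (fun ew => !ew.2.isEmpty) = [] := by
    rw [List.filter_eq_nil_iff]
    intro ew hew
    simp only [pvExtraB, List.mem_map] at hew
    obtain ⟨ev, hev, rfl⟩ := hew
    have hv : ev.2.isEmpty = true := by
      simp only [List.any_eq_false] at h
      have := h ev.2 (by simp only [PySem.Dict.values]; exact List.mem_map_of_mem hev)
      simpa using this
    have hv' : ev.2 = [] := by simpa using hv
    simp [hv']
  rw [this]; rfl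

theorem pvMainANodup (ConnectedFaces : List (List Int)) (vg_set : List Int) :
    (pvMainA ConnectedFaces vg_set).keys.Nodup := by
  apply pvFoldlPreserve (P := fun d : PySem.Dict Int (List Int) => d.keys.Nodup)
  · simp [PySem.Dict.empty, PySem.Dict.keys]
  · intro c face hc
    dsimp only
    split
    · exact pvFoldlPreserve (P := fun d : PySem.Dict Int (List Int) => d.keys.Nodup) _ _ _ hc
        (fun c x h => pvNodupKeysModify c x [] _ h)
    · exact hc

theorem pvApplyBNodup (conn : PySem.Dict Int (List Int)) (extra : List (Int × List Int))
    (h : conn.keys.Nodup) : (pvApplyB conn extra).keys.Nodup :=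
  pvFoldlPreserve (P := fun d : PySem.Dict Int (List Int) => d.keys.Nodup) _ _ _ h
    (fun c ew hc => pvStepKeysNodup c ew hc)

-- ===== the 2-core theory =====
def pvDegF (N : Int → List Int) (S : Finset Int) (k : Int) : Nat :=
  ((N k).filter (fun x => decide (x ∈ S))).length

def pvCoreF (N : Int → List Int) (K : Finset Int) : Finset Int :=
  (K.powerset.filter (fun S => ∀ k ∈ S, 2 ≤ pvDegF N S k)).sup id

theorem pvDegFMono (N : Int → List Int) {S T : Finset Int} (h : S ⊆ T) (k : Int) :
    pvDegF N S k ≤ pvDegF N T k := by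
  exact List.Sublist.length_le (List.monotone_filter_right _ (by intro a ha; simp_all; exact h ha))

theorem pvMemCoreF (N : Int → List Int) (K : Finset Int) (x : Int) :
    x ∈ pvCoreF N K ↔ ∃ S : Finset Int, S ⊆ K ∧ (∀ k ∈ S, 2 ≤ pvDegF N S k) ∧ x ∈ S := by
  simp [pvCoreF, Finset.mem_sup, Finset.mem_filter, Finset.mem_powerset]
  tauto

theorem pvCoreFSubset (N : Int → List Int) (K : Finset Int) : pvCoreF N K ⊆ K := by
  intro x hx
  obtain ⟨S, hSK, _, hxS⟩ := (pvMemCoreF N K x).mp hx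
  exact hSK hxS

theorem pvLeCoreF (N : Int → List Int) {K S : Finset Int} (hS : ∀ k ∈ S, 2 ≤ pvDegF N S k)
    (h : S ⊆ K) : S ⊆ pvCoreF N K := by
  intro x hx
  exact (pvMemCoreF N K x).mpr ⟨S, h, hS, hx⟩

theorem pvStabCoreF (N : Int → List Int) (K : Finset Int) :
    ∀ k ∈ pvCoreF N K, 2 ≤ pvDegF N (pvCoreF N K) k := by
  intro k hk
  obtain ⟨S, hSK, hS, hkS⟩ := (pvMemCoreF N K k).mp hk
  exact le_trans (hS k hkS) (pvDegFMono N (pvLeCoreF N hS hSK) k)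

theorem pvCoreFAll (N : Int → List Int) (K : Finset Int) (h : ∀ k ∈ K, 2 ≤ pvDegF N K k) :
    pvCoreF N K = K :=
  Finset.Subset.antisymm (pvCoreFSubset N K) (pvLeCoreF N h (le_refl K))

theorem pvCoreFDrop (N : Int → List Int) {K K' : Finset Int} (h1 : K' ⊆ K)
    (h2 : ∀ x ∈ K, x ∉ K' → pvDegF N K x < 2) : pvCoreF N K' = pvCoreF N K := by
  apply Finset.Subset.antisymm
  · exact pvLeCoreF N (pvStabCoreF N K') (subset_trans (pvCoreFSubset N K') h1)
  · have hsub : pvCoreF N K ⊆ K' := by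
      intro x hx
      by_contra hxk
      have hxK : x ∈ K := pvCoreFSubset N K hx
      have := pvStabCoreF N K x hx
      have := pvDegFMono N (pvCoreFSubset N K) x
      have := h2 x hxK hxk
      omega
    exact pvLeCoreF N (pvStabCoreF N K) hsub

theorem pvDegLEq (N : Int → List Int) (K : List Int) (k : Int) :
    (PySem.Set.inter (N k) K).length = pvDegF N K.toFinset k := by
  simp only [PySem.Set.inter, pvDegF]
  congr 1
  apply List.filter_congr
  intro x _
  simp [List.contains_eq_mem]

theorem pvToFinsetEraseIdx (l : List Int) (i : Nat) (h : i < l.length) (hn : l.Nodup) :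
    (l.eraseIdx i).toFinset = l.toFinset.erase l[i] := by
  induction l generalizing i with
  | nil => simp at h
  | cons a l ih =>
    cases i with
    | zero =>
      simp only [List.eraseIdx_cons_zero, List.getElem_cons_zero, List.toFinset_cons]
      rw [Finset.erase_insert]
      simp only [List.mem_toFinset]
      exact (List.nodup_cons.mp hn).1
    | succ i =>
      have hi : i < l.length := by simpa using h
      have hnd := List.nodup_cons.mp hn
      simp only [List.eraseIdx_cons_succ, List.getElem_cons_succ, List.toFinset_cons]
      rw [ih i hi hnd.2, Finset.erase_insert_of_ne]
      intro hne
      exact hnd.1 (hne ▸ List.getElem_mem hi)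

theorem pvPeelSpec (N : Int → List Int) :
    ∀ (n : Nat) (alive : List Int), alive.length ≤ n → alive.Nodup →
      (pvPeel N alive).Nodup ∧ (pvPeel N alive).toFinset = pvCoreF N alive.toFinset := by
  intro n
  induction n with
  | zero =>
    intro alive hlen hnd
    have : alive = [] := List.length_eq_zero_iff.mp (Nat.le_zero.mp hlen)
    subst this
    rw [pvPeel]
    simp only [List.filter_nil, List.length_nil, if_true]
    refine ⟨by simp, ?_⟩
    simp only [List.toFinset_nil]
    rw [pvCoreFAll N ∅ (by simp)]
  | succ n ih =>
    intro alive hlen hnd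
    rw [pvPeel]
    by_cases hif : (alive.filter (fun k => decide (2 ≤ (PySem.Set.inter (N k) alive).length))).length = alive.length
    · rw [if_pos hif]
      refine ⟨hnd, ?_⟩
      have hall := List.length_filter_eq_length_iff.mp hif
      rw [pvCoreFAll N alive.toFinset]
      intro k hk
      have hk' : k ∈ alive := List.mem_toFinset.mp hk
      have := hall k hk'
      rw [← pvDegLEq N alive k]
      simpa using this
    · rw [if_neg hif]
      set keep := alive.filter (fun k => decide (2 ≤ (PySem.Set.inter (N k) alive).length)) with hkeep
      have hklen : keep.length ≤ alive.length := List.length_filter_le _ _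
      have hkn : keep.length ≤ n := by omega
      have hknd : keep.Nodup := List.Nodup.filter _ hnd
      obtain ⟨h1, h2⟩ := ih keep hkn hknd
      refine ⟨h1, ?_⟩
      rw [h2]
      apply pvCoreFDrop N
      · intro x hx
        rw [List.mem_toFinset] at hx ⊢
        exact List.mem_of_mem_filter hx
      · intro x hxa hxk
        rw [List.mem_toFinset] at hxa
        rw [← pvDegLEq N alive x]
        by_contra hge
        push Not at hge
        apply hxk
        rw [List.mem_toFinset, hkeep, List.mem_filter]
        exact ⟨hxa, by simpa using hge⟩

theorem pvRecConnSpec (N : Int → List Int) :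
    ∀ (n : Nat) (K : List Int), K.length ≤ n → K.Nodup →
      pvRecConn (K.map (fun k => (k, N k)))
        = (decide (3 ≤ (pvCoreF N K.toFinset).card) || decide ((pvCoreF N K.toFinset).card = K.length)) := by
  intro n
  induction n with
  | zero =>
    intro K hlen hnd
    have hK : K = [] := List.length_eq_zero_iff.mp (Nat.le_zero.mp hlen)
    subst hK
    rw [pvRecConn.eq_def]
    simp only [List.map_nil, List.findIdx?_nil]
    have h0 : pvCoreF N (∅ : Finset Int) = ∅ := pvCoreFAll N ∅ (by simp)
    simp [h0]
  | succ n ih =>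
    intro K hlen hnd
    rw [pvRecConn.eq_def]
    have hkeys : ((K.map (fun k => (k, N k))).map (fun p => p.1)) = K := by
      simp [List.map_map, Function.comp_def]
    rw [hkeys, List.findIdx?_map]
    have hcomp : ((fun e : Int × List Int => decide ((PySem.Set.inter e.2 K).length < 2)) ∘ (fun k => (k, N k)))
        = fun k => decide ((PySem.Set.inter (N k) K).length < 2) := rfl
    rw [hcomp]
    cases hfind : K.findIdx? (fun k => decide ((PySem.Set.inter (N k) K).length < 2)) with
    | none =>
      have hall := List.findIdx?_eq_none_iff.mp hfind
      have hcore : pvCoreF N K.toFinset = K.toFinset := by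
        apply pvCoreFAll
        intro k hk
        have hk' : k ∈ K := List.mem_toFinset.mp hk
        have := hall k hk'
        rw [← pvDegLEq N K k]
        simp only [decide_eq_false_iff_not, not_lt] at this
        exact this
      rw [hcore, List.toFinset_card_of_nodup hnd]
      simp
    | some i =>
      obtain ⟨hi, hidx⟩ := List.findIdx?_eq_some_iff_findIdx_eq.mp hfind
      have hq : (fun k => decide ((PySem.Set.inter (N k) K).length < 2)) K[i] = true := by
        subst hidx
        exact List.findIdx_getElem (w := hi)
      have hdeg : pvDegF N K.toFinset K[i] < 2 := by
        rw [← pvDegLEq N K K[i]]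
        simpa using hq
      simp only [List.eraseIdx_map]
      have hK'nd : (K.eraseIdx i).Nodup := hnd.sublist (List.eraseIdx_sublist K i)
      have hK'len : (K.eraseIdx i).length = K.length - 1 := by
        rw [List.length_eraseIdx]
        simp [hi]
      have hK'fin : (K.eraseIdx i).toFinset = K.toFinset.erase K[i] := pvToFinsetEraseIdx K i hi hnd
      have hdrop : pvCoreF N (K.eraseIdx i).toFinset = pvCoreF N K.toFinset := by
        apply pvCoreFDrop
        · rw [hK'fin]; exact Finset.erase_subset _ _
        · intro x hxK hxK'
          rw [hK'fin, Finset.mem_erase] at hxK'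
          have hx : x = K[i] := by
            by_contra hne
            exact hxK' ⟨hne, hxK⟩
          rw [hx]; exact hdeg
      have hcard : (pvCoreF N K.toFinset).card ≤ (K.eraseIdx i).length := by
        rw [← hdrop, ← List.toFinset_card_of_nodup hK'nd]
        exact Finset.card_le_card (pvCoreFSubset N _)
      simp only [List.length_map]
      by_cases h3 : (K.eraseIdx i).length < 3
      · rw [if_pos h3]
        have h1 : ¬ 3 ≤ (pvCoreF N K.toFinset).card := by omega
        have h2 : (pvCoreF N K.toFinset).card ≠ K.length := by omega
        simp [h1, h2]
      · rw [if_neg h3]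
        have := ih (K.eraseIdx i) (by omega) hK'nd
        rw [this, hdrop]
        by_cases hc3 : 3 ≤ (pvCoreF N K.toFinset).card
        · simp [hc3]
        · have hne1 : (pvCoreF N K.toFinset).card ≠ (K.eraseIdx i).length := by omega
          have hne2 : (pvCoreF N K.toFinset).card ≠ K.length := by omega
          simp [hc3, hne1, hne2]

theorem pvFinal (main sv : PySem.Dict Int (List Int)) (hnd : main.keys.Nodup) :
    pvRecConn (((pvRevA main (pvNewA main sv)).items.filter (fun kv => 1 < kv.2.length)).map
        (fun kv => (kv.1, PySem.Set.ofList kv.2)))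
      = (let conn2 := if main.values.any (fun v => !v.isEmpty) then pvApplyB main (pvExtraB main sv) else main
         let alive := (conn2.items.filter (fun kv => 1 < kv.2.length)).map (fun kv => kv.1)
         let core := pvPeel (fun k => PySem.Set.ofList (conn2.getD k [])) alive
         (decide (3 ≤ core.length) || decide (core.length = alive.length))) := by
  have hM : (if main.values.any (fun v => !v.isEmpty) then pvApplyB main (pvExtraB main sv) else main)
      = pvRevA main (pvNewA main sv) := by
    split
    · exact (pvRevAEqApply main sv hnd).symm
    · rename_i hg
      rw [pvRevAEqApply main sv hnd, pvApplyGuardFalse main sv hnd (by simpa using hg)]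
  simp only [hM]
  have hMnd : (pvRevA main (pvNewA main sv)).keys.Nodup := by
    rw [pvRevAEqApply main sv hnd]; exact pvApplyBNodup _ _ hnd
  set M := pvRevA main (pvNewA main sv) with hMdef
  set alive := (M.items.filter (fun kv => 1 < kv.2.length)).map (fun kv => kv.1) with halive
  have haliveNd : alive.Nodup := by
    rw [halive]
    exact hMnd.sublist (List.Sublist.map _ List.filter_sublist)
  set N := fun k => PySem.Set.ofList (M.getD k []) with hN
  have hmap : ((M.items.filter (fun kv => 1 < kv.2.length)).map (fun kv => (kv.1, PySem.Set.ofList kv.2)))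
      = alive.map (fun k => (k, N k)) := by
    rw [halive, List.map_map]
    apply List.map_congr_left
    intro kv hkv
    have hmem : (kv.1, kv.2) ∈ M.items := by
      simpa using List.mem_of_mem_filter hkv
    simp only [Function.comp, hN]
    rw [PySem.Dict.getD_of_mem_items M hmem hMnd]
  rw [hmap, pvRecConnSpec N alive.length alive le_rfl haliveNd]
  obtain ⟨hcnd, hcfin⟩ := pvPeelSpec N alive.length alive le_rfl haliveNd
  have hlen : (pvPeel N alive).length = (pvCoreF N alive.toFinset).card := by
    rw [← List.toFinset_card_of_nodup hcnd, hcfin]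
  rw [hlen]

-- ===== VERDICT (by name: the statement is the Claim_ definition above) =====
theorem checkEnclosedFacesVertex_spec : Claim_equal_checkEnclosedFacesVertex := by
  intro ConnectedFaces vg_set Precalculated_Outline_data _hdom _hpre
  unfold Spec_checkEnclosedFacesVertex checkEnclosedFacesVertex checkEnclosedFacesVertex_alt
  exact pvFinal (pvMainA ConnectedFaces vg_set)
    (PySem.Dict.mk ((PySem.Dict.mk Precalculated_Outline_data).getD "Same_Vertex" []))
    (pvMainANodup ConnectedFaces vg_set)
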